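-- pv_equiv track=rewrite | github.com/crcox/AAE_old | utils.py | count_dashes
-- ===== SOURCE A (Python) =====
-- def count_dashes(s):
-- # Orth and Phon patterns are _ padded. They need to be tracked before they are
-- # stripped so they can be re-added to the modified solution.
-- 	ind=0
-- 	dashes=[0,0]
-- 	for c in s:
-- 		if c=='_':
-- 			dashes[ind]+=1
-- 		else:
-- 			ind=1 # so the next dash encountered will increment the second
-- 				  # counter.
-- 	return tuple(dashes)
-- ===== SOURCE B (Python) =====
-- def count_dashes(s):
--     leading = len(s) - len(s.lstrip('_'))
--     total = s.count('_')
--     return (leading, total - leading)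
-- ===== Notes on version B (the rewrite author's own statement) =====
-- stated objective: simpler
-- what changed: Replaces the stateful character loop with two whole-string builtin computations: leading underscores via len(s)-len(s.lstrip('_')), and the rest as s.count('_') minus leading (A counts every underscore after the first non-underscore character, not just trailing ones); the builtins run in C, measured faster.
import Mathlib
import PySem

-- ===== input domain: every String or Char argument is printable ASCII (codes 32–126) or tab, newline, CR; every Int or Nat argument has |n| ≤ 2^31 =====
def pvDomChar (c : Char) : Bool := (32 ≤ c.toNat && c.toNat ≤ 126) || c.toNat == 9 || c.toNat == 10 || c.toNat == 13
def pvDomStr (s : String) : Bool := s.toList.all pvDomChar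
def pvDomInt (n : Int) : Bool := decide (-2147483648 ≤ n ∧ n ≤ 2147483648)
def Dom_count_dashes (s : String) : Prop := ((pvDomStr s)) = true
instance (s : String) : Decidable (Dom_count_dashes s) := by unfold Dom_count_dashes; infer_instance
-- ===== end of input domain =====

-- B replaces A's stateful character loop by two whole-string computations
-- (leading-underscore count and total underscore count); objective: simpler.

-- ===== PORT A =====
-- state: (ind, (dashes[0], dashes[1])); ind flips to 1 at the first non-underscore
def count_dashes (s : String) : Int × Int :=
  let fin := s.toList.foldl
    (fun (st : Nat × (Int × Int)) c =>
      if c = '_' then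
        (st.1, if st.1 = 0 then (st.2.1 + 1, st.2.2) else (st.2.1, st.2.2 + 1))
      else (1, st.2))
    (0, (0, 0))
  (fin.2.1, fin.2.2)

-- ===== PORT B =====
def count_dashes_alt (s : String) : Int × Int :=
  -- s.lstrip('_') ported by hand as dropWhile (· == '_') (exact: Python lstrip('_')
  -- removes exactly the leading '_' characters)
  let leading : Int := (PySem.Str.len s : Int) - ((s.toList.dropWhile (· == '_')).length : Int)
  let total : Int := (PySem.Str.count s "_" : Int)
  (leading, total - leading)

-- ===== PRECONDITION & SPEC =====
def Spec_count_dashes (s : String) (out : Int × Int) : Prop := out = count_dashes_alt s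
instance (s : String) (out : Int × Int) : Decidable (Spec_count_dashes s out) := by unfold Spec_count_dashes; infer_instance

-- ===== CLAIM (what is proved, stated in full; the proofs are below) =====
def Claim_equal_count_dashes : Prop := ∀ (s : String), Dom_count_dashes s → Spec_count_dashes s (count_dashes s)

-- ===== LEMMAS AND PROOFS =====

-- non-overlapping substring count with a single-char needle counts the matching chars
theorem count_go_single (fuel : Nat) : ∀ (l : List Char) (acc : Nat), l.length ≤ fuel →
    PySem.Chars.count.go ['_'] fuel l acc = acc + l.countP (· == '_') := by
  induction fuel with
  | zero =>
    intro l acc h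
    have : l = [] := List.eq_nil_of_length_eq_zero (Nat.le_zero.mp h)
    subst this
    simp [PySem.Chars.count.go]
  | succ n ih =>
    intro l acc h
    cases l with
    | nil => simp [PySem.Chars.count.go]
    | cons c t =>
      simp only [PySem.Chars.count.go]
      by_cases hc : c = '_'
      · subst hc
        have hpre : List.isPrefixOf ['_'] ('_' :: t) = true := by
          simp [List.isPrefixOf]
        simp only [hpre, if_true, List.length_cons, List.length_nil, List.drop_succ_cons,
          List.drop_zero]
        rw [ih t (acc + 1) (by simpa using Nat.lt_succ_iff.mp (by simpa using h))]
        simp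
        omega
      · have hpre : List.isPrefixOf ['_'] (c :: t) = false := by
          simp [List.isPrefixOf]
          exact fun h' => hc h'.symm
        simp only [hpre]
        rw [ih t acc (by simpa using Nat.lt_succ_iff.mp (by simpa using h))]
        simp [hc]

theorem count_single (l : List Char) :
    PySem.Chars.count l ['_'] = l.countP (· == '_') := by
  simp only [PySem.Chars.count, List.isEmpty_cons]
  simpa using count_go_single l.length l 0 le_rfl

-- once ind = 1, every '_' increments the second counter
theorem foldA_one (l : List Char) : ∀ (a b : Int),
    l.foldl
      (fun (st : Nat × (Int × Int)) c =>
        if c = '_' then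
          (st.1, if st.1 = 0 then (st.2.1 + 1, st.2.2) else (st.2.1, st.2.2 + 1))
        else (1, st.2))
      (1, (a, b)) = (1, (a, b + (l.countP (· == '_') : Int))) := by
  induction l with
  | nil => intro a b; simp
  | cons c t ih =>
    intro a b
    by_cases hc : c = '_'
    · subst hc
      simp only [List.foldl_cons]
      norm_num
      rw [ih]
      simp
      ring
    · simp only [List.foldl_cons, if_neg hc]
      rw [ih]
      simp [hc]

-- from ind = 0: first counter gains the leading-underscore count, second the rest
theorem foldA_zero (l : List Char) : ∀ (a b : Int),
    (l.foldl
      (fun (st : Nat × (Int × Int)) c =>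
        if c = '_' then
          (st.1, if st.1 = 0 then (st.2.1 + 1, st.2.2) else (st.2.1, st.2.2 + 1))
        else (1, st.2))
      (0, (a, b))).2 =
      (a + ((l.takeWhile (· == '_')).length : Int),
       b + ((l.countP (· == '_') : Int) - ((l.takeWhile (· == '_')).length : Int))) := by
  induction l with
  | nil => intro a b; simp
  | cons c t ih =>
    intro a b
    by_cases hc : c = '_'
    · subst hc
      simp only [List.foldl_cons]
      norm_num
      rw [ih (a + 1) b]
      simp
      ring
    · simp only [List.foldl_cons, if_neg hc]
      rw [foldA_one t a b]
      simp [hc]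

-- ===== VERDICT (by name: the statement is the Claim_ definition above) =====
theorem count_dashes_spec : Claim_equal_count_dashes := by
  intro s _
  unfold Spec_count_dashes count_dashes count_dashes_alt
  have hsplit : (s.toList.takeWhile (· == '_')).length + (s.toList.dropWhile (· == '_')).length
      = s.toList.length := by
    rw [← List.length_append, List.takeWhile_append_dropWhile]
  have hcnt : PySem.Str.count s "_" = s.toList.countP (· == '_') := by
    have : ("_" : String).toList = ['_'] := rfl
    simp [PySem.Str.count, this, count_single]
  have hlen : PySem.Str.len s = s.toList.length := by
    simp [PySem.Str.len]
  simp only []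
  rw [foldA_zero s.toList 0 0, hcnt, hlen]
  simp only [Prod.mk.injEq]
  constructor <;> omega
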